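-- pv_equiv track=rewrite | github.com/neurodataops/migdata2 | validation_generator.py | _build_table_columns
-- ===== SOURCE A (Python) =====
-- from collections import defaultdict
--
-- EXCLUDED_SCHEMAS = ("pg_catalog", "information_schema", "pg_internal")
--
-- def _build_table_columns(catalog: dict) -> dict:
--     """Build {(schema, table): [col_dict, ...]}."""
--     result = defaultdict(list)
--     for c in catalog.get("columns", []):
--         schema = (c.get("table_schema") or "").lower()
--         table = (c.get("table_name") or "").lower()
--         if schema in EXCLUDED_SCHEMAS:
--             continue
--         result[(schema, table)].append(c)
--     return dict(result)
-- ===== SOURCE B (Python) =====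
-- EXCLUDED_SCHEMAS = ("pg_catalog", "information_schema", "pg_internal")
--
-- def _build_table_columns(catalog: dict) -> dict:
--     """Build {(schema, table): [col_dict, ...]} by a two-pass group-by-key."""
--     pairs = []
--     for c in catalog.get("columns", []):
--         key = ((c.get("table_schema") or "").lower(),
--                (c.get("table_name") or "").lower())
--         if key[0] not in EXCLUDED_SCHEMAS:
--             pairs.append((key, c))
--     keys = list(dict.fromkeys(k for k, _ in pairs))
--     return {k: [c for k2, c in pairs if k2 == k] for k in keys}
-- ===== Notes on version B (the rewrite author's own statement) =====
-- stated objective: alternative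
-- what changed: Replaces the streaming defaultdict accumulation with a two-pass group-by: first build the filtered (key, column) pair list, then dedup the keys in first-occurrence order and collect each group's columns by a per-key filter.
import Mathlib
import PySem

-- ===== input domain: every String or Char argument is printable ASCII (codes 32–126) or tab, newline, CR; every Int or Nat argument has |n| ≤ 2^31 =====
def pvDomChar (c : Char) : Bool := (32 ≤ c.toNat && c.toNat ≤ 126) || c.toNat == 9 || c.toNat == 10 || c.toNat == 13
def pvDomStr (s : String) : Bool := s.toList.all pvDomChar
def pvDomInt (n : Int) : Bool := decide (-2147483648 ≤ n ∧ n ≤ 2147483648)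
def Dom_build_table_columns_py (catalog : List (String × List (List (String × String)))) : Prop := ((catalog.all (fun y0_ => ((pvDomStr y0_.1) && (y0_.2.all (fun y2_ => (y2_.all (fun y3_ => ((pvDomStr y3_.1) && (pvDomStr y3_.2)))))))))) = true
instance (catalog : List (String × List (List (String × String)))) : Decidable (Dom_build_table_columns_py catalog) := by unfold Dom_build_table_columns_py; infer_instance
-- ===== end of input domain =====

-- B replaces A's streaming defaultdict accumulation by a two-pass group-by (filtered pair
-- list, dedup of keys, per-key collection); same result, objective: alternative.

-- shared helpers (same expressions in both Pythons): `d.get(k) or ""` and the (schema, table) key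
def pvGetS (c : List (String × String)) (k : String) : String :=
  ((c.find? (fun p => p.1 == k)).map Prod.snd).getD ""

def pvKey (c : List (String × String)) : String × String :=
  (PySem.Str.lower (pvGetS c "table_schema"), PySem.Str.lower (pvGetS c "table_name"))

def pvExcluded : List String := ["pg_catalog", "information_schema", "pg_internal"]

-- ===== PORT A =====
-- result[(schema, table)].append(c) on a defaultdict(list): modify the first matching
-- entry in place, otherwise append a fresh singleton entry at the end.
def pvUpsert (acc : List (String × String × List (List (String × String))))
    (k : String × String) (c : List (String × String)) :
    List (String × String × List (List (String × String))) :=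
  match acc with
  | [] => [(k.1, k.2, [c])]
  | (s, t, v) :: rest =>
    if s = k.1 ∧ t = k.2 then (s, t, v ++ [c]) :: rest
    else (s, t, v) :: pvUpsert rest k c

def build_table_columns_py (catalog : List (String × List (List (String × String)))) :
    List (String × String × List (List (String × String))) :=
  let cols := ((catalog.find? (fun p => p.1 == "columns")).map Prod.snd).getD []
  cols.foldl (fun acc c =>
    let k := pvKey c
    if k.1 ∈ pvExcluded then acc else pvUpsert acc k c) []

-- ===== PORT B =====
def build_table_columns_py_alt (catalog : List (String × List (List (String × String)))) :
    List (String × String × List (List (String × String))) :=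
  let cols := ((catalog.find? (fun p => p.1 == "columns")).map Prod.snd).getD []
  let pairs := cols.foldl (fun ps c =>
    let k := pvKey c
    if k.1 ∈ pvExcluded then ps else ps ++ [(k, c)]) []
  let keys := PySem.List.dedup (pairs.map Prod.fst)
  keys.map (fun k => (k.1, k.2, (pairs.filter (fun p => p.1 == k)).map Prod.snd))

-- ===== PRECONDITION & SPEC =====
def Spec_build_table_columns_py (catalog : List (String × List (List (String × String)))) (out : List (String × String × List (List (String × String)))) : Prop := out = build_table_columns_py_alt catalog
instance (catalog : List (String × List (List (String × String)))) (out : List (String × String × List (List (String × String)))) : Decidable (Spec_build_table_columns_py catalog out) := by unfold Spec_build_table_columns_py; infer_instance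

-- ===== CLAIM (what is proved, stated in full; the proofs are below) =====
def Claim_equal_build_table_columns_py : Prop := ∀ (catalog : List (String × List (List (String × String)))), Dom_build_table_columns_py catalog → Spec_build_table_columns_py catalog (build_table_columns_py catalog)

-- ===== LEMMAS AND PROOFS =====

-- the filtered (key, column) pair list both algorithms work over
def pvPairs (cols : List (List (String × String))) :
    List ((String × String) × List (String × String)) :=
  (cols.filter (fun c => !(decide ((pvKey c).1 ∈ pvExcluded)))).map (fun c => (pvKey c, c))

-- the grouped result, expressed over the pair list
def pvGroup (ps : List ((String × String) × List (String × String))) :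
    List (String × String × List (List (String × String))) :=
  (PySem.List.dedup (ps.map Prod.fst)).map
    (fun k => (k.1, k.2, (ps.filter (fun p => p.1 == k)).map Prod.snd))

theorem pvPairs_fold (cols : List (List (String × String)))
    (ps : List ((String × String) × List (String × String))) :
    cols.foldl (fun ps c =>
      let k := pvKey c
      if k.1 ∈ pvExcluded then ps else ps ++ [(k, c)]) ps = ps ++ pvPairs cols := by
  induction cols generalizing ps with
  | nil => simp [pvPairs]
  | cons c cols ih =>
    simp only [List.foldl_cons]
    by_cases h : (pvKey c).1 ∈ pvExcluded <;>
      simp [ih, pvPairs, h, List.append_assoc]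

theorem pvA_fold (cols : List (List (String × String)))
    (acc : List (String × String × List (List (String × String)))) :
    cols.foldl (fun acc c =>
      let k := pvKey c
      if k.1 ∈ pvExcluded then acc else pvUpsert acc k c) acc
    = (pvPairs cols).foldl (fun a p => pvUpsert a p.1 p.2) acc := by
  induction cols generalizing acc with
  | nil => simp [pvPairs]
  | cons c cols ih =>
    by_cases h : (pvKey c).1 ∈ pvExcluded <;>
      simp [ih, pvPairs, h]

theorem pv_dedup_append_singleton {α : Type} [BEq α] [LawfulBEq α] (xs : List α) (x : α) :
    PySem.List.dedup (xs ++ [x])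
      = if x ∈ xs then PySem.List.dedup xs else PySem.List.dedup xs ++ [x] := by
  simp only [PySem.List.dedup_eq_ofList, PySem.Set.ofList_append_singleton,
    PySem.Set.add_eq_ite, PySem.Set.mem_ofList]

theorem pvUpsert_map (ks : List (String × String)) (hnd : ks.Nodup)
    (v : String × String → List (List (String × String)))
    (k : String × String) (c : List (String × String)) :
    pvUpsert (ks.map (fun k' => (k'.1, k'.2, v k'))) k c
      = if k ∈ ks then
          ks.map (fun k' => (k'.1, k'.2, if k' = k then v k' ++ [c] else v k'))
        else ks.map (fun k' => (k'.1, k'.2, v k')) ++ [(k.1, k.2, [c])] := by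
  induction ks with
  | nil => simp [pvUpsert]
  | cons k₀ ks ih =>
    rcases List.nodup_cons.mp hnd with ⟨hk₀, hnd'⟩
    by_cases he : k₀ = k
    · subst he
      have hcongr : ∀ k' ∈ ks, ((k'.1, k'.2, if k' = k₀ then v k' ++ [c] else v k')
          : String × String × List (List (String × String))) = (k'.1, k'.2, v k') := by
        intro k' hk'
        have hne : k' ≠ k₀ := fun h => hk₀ (h ▸ hk')
        simp [hne]
      simp [pvUpsert, List.map_congr_left hcongr]
    · have hne : ¬(k₀.1 = k.1 ∧ k₀.2 = k.2) := by
        intro ⟨h1, h2⟩; exact he (Prod.ext h1 h2)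
      have he' : k ≠ k₀ := fun h => he h.symm
      by_cases hm : k ∈ ks
      · simp [pvUpsert, hne, ih hnd', hm, he]
      · simp [pvUpsert, hne, ih hnd', hm, he']

theorem pv_filter_nil_of_not_mem (ps : List ((String × String) × List (String × String)))
    (k : String × String) (h : k ∉ ps.map Prod.fst) :
    ps.filter (fun p => p.1 == k) = [] := by
  refine List.filter_eq_nil_iff.mpr (fun p hp hbeq => h ?_)
  have hpk : p.1 = k := by simpa using hbeq
  exact hpk ▸ List.mem_map_of_mem hp

theorem pvGroup_append (ps : List ((String × String) × List (String × String)))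
    (k : String × String) (c : List (String × String)) :
    pvGroup (ps ++ [(k, c)]) = pvUpsert (pvGroup ps) k c := by
  have hnd : (PySem.List.dedup (ps.map Prod.fst)).Nodup := PySem.List.nodup_dedup _
  have hmem : k ∈ PySem.List.dedup (ps.map Prod.fst) ↔ k ∈ ps.map Prod.fst :=
    PySem.List.mem_dedup _ _
  have hfil : ∀ k' : String × String,
      (ps ++ [(k, c)]).filter (fun p => p.1 == k')
        = ps.filter (fun p => p.1 == k') ++ (if k = k' then [(k, c)] else []) := by
    intro k'
    by_cases h : k = k'
    · simp [List.filter_append, List.filter, h]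
    · have hb : (k == k') = false := beq_eq_false_iff_ne.mpr h
      simp [List.filter_append, List.filter, hb, h]
  unfold pvGroup
  rw [List.map_append]
  simp only [List.map_cons, List.map_nil]
  rw [pv_dedup_append_singleton,
    pvUpsert_map _ hnd (fun k' => (ps.filter (fun p => p.1 == k')).map Prod.snd) k c]
  by_cases hm : k ∈ ps.map Prod.fst
  · rw [if_pos hm, if_pos (hmem.mpr hm)]
    refine List.map_congr_left (fun k' _ => ?_)
    rw [hfil k']
    by_cases h : k' = k
    · subst h; simp
    · have h' : k ≠ k' := fun hh => h hh.symm
      simp [h, h']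
  · rw [if_neg hm, if_neg (fun hh => hm (hmem.mp hh)), List.map_append, List.map_singleton]
    congr 1
    · refine List.map_congr_left (fun k' hk' => ?_)
      have hne : k ≠ k' := fun h => hm (h ▸ ((PySem.List.mem_dedup _ _).mp hk'))
      rw [hfil k', if_neg hne, List.append_nil]
    · rw [hfil k, if_pos rfl, pv_filter_nil_of_not_mem ps k hm]
      simp

theorem pv_main (ps : List ((String × String) × List (String × String))) :
    ps.foldl (fun a p => pvUpsert a p.1 p.2) [] = pvGroup ps := by
  induction ps using List.reverseRecOn with
  | nil => rfl
  | append_singleton ps p ih =>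
    rw [List.foldl_append, List.foldl_cons, List.foldl_nil, ih, ← pvGroup_append]

-- ===== VERDICT (by name: the statement is the Claim_ definition above) =====
theorem build_table_columns_py_spec : Claim_equal_build_table_columns_py := by
  intro catalog _
  unfold Spec_build_table_columns_py
  have hcols : build_table_columns_py catalog
      = pvGroup (pvPairs (((catalog.find? (fun p => p.1 == "columns")).map Prod.snd).getD [])) := by
    show (((catalog.find? (fun p => p.1 == "columns")).map Prod.snd).getD []).foldl
        (fun acc c =>
          let k := pvKey c
          if k.1 ∈ pvExcluded then acc else pvUpsert acc k c) [] = _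
    rw [pvA_fold, pv_main]
  have hpairs := pvPairs_fold (((catalog.find? (fun p => p.1 == "columns")).map Prod.snd).getD []) []
  rw [List.nil_append] at hpairs
  have halt : build_table_columns_py_alt catalog
      = pvGroup (pvPairs (((catalog.find? (fun p => p.1 == "columns")).map Prod.snd).getD [])) := by
    show (PySem.List.dedup (((((catalog.find? (fun p => p.1 == "columns")).map Prod.snd).getD []).foldl
          (fun ps c =>
            let k := pvKey c
            if k.1 ∈ pvExcluded then ps else ps ++ [(k, c)]) []).map Prod.fst)).map
        (fun k => (k.1, k.2,
          (((((catalog.find? (fun p => p.1 == "columns")).map Prod.snd).getD []).foldl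
            (fun ps c =>
              let k := pvKey c
              if k.1 ∈ pvExcluded then ps else ps ++ [(k, c)]) []).filter
            (fun p => p.1 == k)).map Prod.snd)) = _
    rw [hpairs]
    rfl
  rw [hcols, halt]
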